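-- pv_equiv track=rewrite | github.com/GregoryMorse/sudoku | sudoku.py | max_sum_efficient
-- ===== SOURCE A (Python) =====
-- import itertools
--
-- def max_sum_efficient(value_sets):
--   for comb in itertools.combinations(sorted(set.union(*value_sets), reverse=True), len(value_sets)):
--     v = list(vs.intersection(comb) for vs in value_sets)
--     #now if any 1 has 0 values continue
--     if any(len(vs) == 0 for vs in v): continue
--     for p in range(2, len(value_sets)):
--       for c in itertools.combinations(v, p):
--         if len(set.union(*c)) < p: #any p of the sets together have less than p values
--           break
--       else: continue
--       break
--     else: return sum(comb), set(comb)
-- ===== SOURCE B (Python) =====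
-- def max_sum_efficient(value_sets):
--   # recursive first-fit search over the descending universe; feasibility of a candidate
--   # combination is decided by a direct backtracking search for a system of distinct
--   # representatives instead of verifying Hall's condition on every subset of the sets
--   n = len(value_sets)
--   universe = sorted(set.union(*value_sets), reverse=True)
--
--   def sdr(sets, chosen, used):
--     # is there a system of distinct representatives for `sets`, drawn from `chosen` \ `used`?
--     if not sets:
--       return True
--     return any(sdr(sets[1:], chosen, used | {x})
--                for x in sets[0] if x in chosen and x not in used)
--
--   def search(items, picked):
--     if len(picked) == n:
--       return (sum(picked), set(picked)) if sdr(value_sets, set(picked), set()) else None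
--     if len(items) + len(picked) < n:
--       return None
--     return search(items[1:], picked + [items[0]]) or search(items[1:], picked)
--
--   return search(universe, [])
-- ===== Notes on version B (the rewrite author's own statement) =====
-- stated objective: alternative
-- what changed: A enumerates n-combinations of the descending universe and verifies Hall's condition by testing every p-subset of the restricted sets (p = 2..n-1); B is a recursive first-fit search over the universe with a length prune that certifies each full candidate by directly backtracking for a system of distinct representatives instead of checking Hall's condition.
-- outside the precondition, e.g. on max_sum_efficient([]): A raises TypeError, B raises TypeError
import Mathlib
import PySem

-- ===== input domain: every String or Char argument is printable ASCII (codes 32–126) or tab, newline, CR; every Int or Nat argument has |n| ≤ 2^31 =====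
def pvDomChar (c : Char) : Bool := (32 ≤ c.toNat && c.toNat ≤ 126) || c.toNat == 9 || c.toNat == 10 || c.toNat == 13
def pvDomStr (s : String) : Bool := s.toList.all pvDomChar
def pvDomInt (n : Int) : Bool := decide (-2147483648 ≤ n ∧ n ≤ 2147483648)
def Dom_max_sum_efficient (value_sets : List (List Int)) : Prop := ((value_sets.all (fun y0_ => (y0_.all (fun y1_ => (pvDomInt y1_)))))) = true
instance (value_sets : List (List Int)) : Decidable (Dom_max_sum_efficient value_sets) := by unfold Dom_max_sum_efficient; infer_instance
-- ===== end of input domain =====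

-- B replaces A's subset-enumeration Hall-condition test by a direct backtracking search for a
-- system of distinct representatives, driven by a recursive first-fit scan of the descending
-- universe (objective: alternative algorithm, similar cost).

-- ===== PORT A =====
/-- `set.union(*sets)`: left fold of Python set-union over the remaining sets, starting from
`set(first)`.  The `[]` case only makes the function total (A raises there; excluded by `Pre_`). -/
def pvUnionAll (sets : List (List Int)) : PySem.Set Int :=
  match sets with
  | [] => PySem.Set.empty
  | s :: rest => rest.foldl (fun acc t => PySem.Set.union acc t) (PySem.Set.ofList s)

/-- A's per-combination test: each `vs ∩ comb` nonempty, and for every `p ∈ range(2, n)` no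
`p` of the restricted sets have a union of fewer than `p` values (the `for/else/break` ladder). -/
def pvHallCheck (value_sets : List (List Int)) (n : Nat) (comb : List Int) : Bool :=
  let v := value_sets.map (fun vs => PySem.Set.inter (PySem.Set.ofList vs) comb)
  if v.any (fun s => PySem.Set.len s == 0) then false
  else
    (PySem.List.pyRange 2 (n : Int) 1).all (fun p =>
      (PySem.List.combinations v p.toNat).all (fun c =>
        !(decide (PySem.Set.len (pvUnionAll c) < p))))

def max_sum_efficient (value_sets : List (List Int)) : Option (Int × List Int) :=
  let n := value_sets.length
  let univ_d := PySem.List.sorted (pvUnionAll value_sets) (fun x => x) true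
  (PySem.List.combinations univ_d n).findSome? (fun comb =>
    if pvHallCheck value_sets n comb then some (comb.sum, PySem.Set.ofList comb) else none)

-- ===== PORT B =====
/-- backtracking search for a system of distinct representatives of `sets`
drawn from `chosen \ used`. -/
def pvSdr (sets : List (List Int)) (chosen used : PySem.Set Int) : Bool :=
  match sets with
  | [] => true
  | s :: rest =>
      s.any (fun x =>
        PySem.Set.contains chosen x && !PySem.Set.contains used x &&
          pvSdr rest chosen (PySem.Set.union used [x]))

/-- first-fit recursion over the remaining universe (`or` = Python's `or` on an
`Optional` result).  The `[]` arm is unreachable (the length prune fires first);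
it only makes the match total. -/
def pvSearch (value_sets : List (List Int)) (n : Nat) (items picked : List Int) :
    Option (Int × List Int) :=
  if picked.length = n then
    if pvSdr value_sets (PySem.Set.ofList picked) PySem.Set.empty then
      some (picked.sum, PySem.Set.ofList picked)
    else none
  else if items.length + picked.length < n then none
  else
    match items with
    | [] => none
    | x :: rest =>
        (pvSearch value_sets n rest (picked ++ [x])).or (pvSearch value_sets n rest picked)
  termination_by items.length
  decreasing_by all_goals simp

def max_sum_efficient_alt (value_sets : List (List Int)) : Option (Int × List Int) :=
  let n := value_sets.length
  let univ_d := PySem.List.sorted (pvUnionAll value_sets) (fun x => x) true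
  pvSearch value_sets n univ_d []

-- ===== PRECONDITION & SPEC =====
-- Pre_ excludes only the empty list, on which A's `set.union(*value_sets)` raises TypeError.
def Pre_max_sum_efficient (value_sets : List (List Int)) : Prop := value_sets ≠ []
instance (value_sets : List (List Int)) : Decidable (Pre_max_sum_efficient value_sets) := by
  unfold Pre_max_sum_efficient; infer_instance

def pvWitness_max_sum_efficient : List (List Int) := [[1], [1, 3]]

def Spec_max_sum_efficient (value_sets : List (List Int)) (out : Option (Int × List Int)) : Prop :=
  out = max_sum_efficient_alt value_sets
instance (value_sets : List (List Int)) (out : Option (Int × List Int)) :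
    Decidable (Spec_max_sum_efficient value_sets out) := by
  unfold Spec_max_sum_efficient; infer_instance

-- ===== CLAIM (what is proved, stated in full; the proofs are below) =====
def Claim_equal_max_sum_efficient : Prop :=
  ∀ (value_sets : List (List Int)), Dom_max_sum_efficient value_sets →
    Pre_max_sum_efficient value_sets →
    Spec_max_sum_efficient value_sets (max_sum_efficient value_sets)

-- ===== LEMMAS AND PROOFS =====

/-- the common leaf: what both programs return for a full candidate combination, with B's test. -/
def pvLeaf (vs : List (List Int)) (q : List Int) : Option (Int × List Int) :=
  if pvSdr vs (PySem.Set.ofList q) PySem.Set.empty then some (q.sum, PySem.Set.ofList q) else none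

theorem pv_findSome?_congr_mem {α β : Type} {l : List α} {f g : α → Option β}
    (h : ∀ x ∈ l, f x = g x) : l.findSome? f = l.findSome? g := by
  induction l with
  | nil => rfl
  | cons a t ih =>
      simp only [List.findSome?_cons, h a (by simp)]
      cases g a with
      | none => exact ih (fun x hx => h x (by simp [hx]))
      | some b => rfl

theorem pv_mem_unionAll_foldl (x : Int) (l : List (List Int)) :
    ∀ (acc : PySem.Set Int),
      x ∈ l.foldl (fun a t => PySem.Set.union a t) acc ↔ x ∈ acc ∨ ∃ s ∈ l, x ∈ s := by
  induction l with
  | nil => simp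
  | cons t l ih =>
      intro acc
      simp [List.foldl_cons, ih, PySem.Set.mem_union, or_assoc]

theorem pv_mem_unionAll (sets : List (List Int)) (x : Int) :
    x ∈ pvUnionAll sets ↔ ∃ s ∈ sets, x ∈ s := by
  cases sets with
  | nil => simp [pvUnionAll, PySem.Set.empty]
  | cons s rest =>
      simp [pvUnionAll, pv_mem_unionAll_foldl, PySem.Set.mem_ofList]

theorem pv_nodup_unionAll_foldl (l : List (List Int)) :
    ∀ (acc : PySem.Set Int), acc.Nodup →
      (l.foldl (fun a t => PySem.Set.union a t) acc).Nodup := by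
  induction l with
  | nil => exact fun _ h => h
  | cons t l ih =>
      intro acc h
      exact ih _ (PySem.Set.nodup_union _ _ h)

theorem pv_nodup_unionAll (sets : List (List Int)) : (pvUnionAll sets).Nodup := by
  cases sets with
  | nil => simp [pvUnionAll, PySem.Set.empty]
  | cons s rest => exact pv_nodup_unionAll_foldl rest _ (PySem.Set.nodup_ofList s)

theorem pv_search_eq_findSome (vs : List (List Int)) (n : Nat) :
    ∀ (items picked : List Int), picked.length ≤ n →
      pvSearch vs n items picked =
        (PySem.List.combinations items (n - picked.length)).findSome?
          (fun c => pvLeaf vs (picked ++ c)) := by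
  intro items
  induction items with
  | nil =>
      intro picked hle
      rw [pvSearch]
      rcases eq_or_lt_of_le hle with heq | hlt
      · simp [heq, PySem.List.combinations_zero, pvLeaf]
      · obtain ⟨k, hk⟩ : ∃ k, n - picked.length = k + 1 := ⟨n - picked.length - 1, by omega⟩
        have hne : ¬ picked.length = n := by omega
        simp [hne, hk, PySem.List.combinations_nil_succ]
  | cons x rest ih =>
      intro picked hle
      rw [pvSearch]
      rcases eq_or_lt_of_le hle with heq | hlt
      · simp [heq, PySem.List.combinations_zero, pvLeaf]
      · rw [if_neg (by omega)]
        by_cases hsz : (x :: rest).length + picked.length < n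
        · rw [if_pos hsz]
          have hlt2 : (x :: rest).length < n - picked.length := by simp at hsz ⊢; omega
          rw [PySem.List.combinations_eq_nil_of_length_lt _ hlt2]
          simp
        · rw [if_neg hsz]
          obtain ⟨k, hk⟩ : ∃ k, n - picked.length = k + 1 := ⟨n - picked.length - 1, by omega⟩
          have h1 := ih (picked ++ [x]) (by simp; omega)
          have h2 := ih picked (le_of_lt hlt)
          rw [h1, h2, hk, PySem.List.combinations_cons_succ, List.findSome?_append,
            List.findSome?_map]
          have hk' : n - (picked ++ [x]).length = k := by simp; omega
          rw [hk']
          have heq : List.findSome? (fun c => pvLeaf vs (picked ++ [x] ++ c))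
                (PySem.List.combinations rest k) =
              List.findSome? ((fun c => pvLeaf vs (picked ++ c)) ∘ fun c => x :: c)
                (PySem.List.combinations rest k) :=
            pv_findSome?_congr_mem (fun c _ => by
              simp only [Function.comp_apply]
              rw [← List.append_cons])
          rw [heq]

theorem pv_sdr_iff (vs : List (List Int)) (chosen : PySem.Set Int) :
    ∀ (used : PySem.Set Int),
      pvSdr vs chosen used = true ↔
        ∃ reps : List Int,
          List.Forall₂ (fun s r => r ∈ s ∧ r ∈ chosen) vs reps ∧
          reps.Nodup ∧ ∀ y ∈ reps, y ∉ used := by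
  induction vs with
  | nil =>
      intro used
      rw [pvSdr]
      simp only [true_iff, List.forall₂_nil_left_iff]
      exact ⟨[], rfl, by simp⟩
  | cons s rest ih =>
      intro used
      rw [pvSdr]
      constructor
      · intro h
        simp only [List.any_eq_true, Bool.and_eq_true, Bool.not_eq_true'] at h
        obtain ⟨x, hxs, ⟨hch, hnus⟩, hrec⟩ := h
        obtain ⟨reps, hf, hnd, havoid⟩ := (ih _).1 hrec
        refine ⟨x :: reps,
          List.Forall₂.cons ⟨hxs, (PySem.Set.contains_iff _ _).1 hch⟩ hf, ?_, ?_⟩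
        · refine List.nodup_cons.2 ⟨?_, hnd⟩
          intro hxr
          exact (havoid x hxr) ((PySem.Set.mem_union _ _ _).2 (Or.inr (by simp)))
        · intro y hy
          rcases List.mem_cons.1 hy with rfl | hym
          · intro hm
            rw [(PySem.Set.contains_iff used _).2 hm] at hnus
            simp at hnus
          · intro hm
            exact havoid y hym ((PySem.Set.mem_union _ _ _).2 (Or.inl hm))
      · rintro ⟨reps, hf, hnd, havoid⟩
        rcases hf with _ | ⟨⟨hrs, hrch⟩, hf'⟩
        rename_i r reps'
        apply List.any_eq_true.2
        refine ⟨r, hrs, ?_⟩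
        simp only [Bool.and_eq_true, Bool.not_eq_true']
        refine ⟨⟨(PySem.Set.contains_iff _ _).2 hrch, ?_⟩, ?_⟩
        · cases hcon : PySem.Set.contains used r with
          | false => rfl
          | true =>
              exact absurd ((PySem.Set.contains_iff _ _).1 hcon) (havoid r (by simp))
        · apply (ih _).2
          refine ⟨reps', hf', (List.nodup_cons.1 hnd).2, ?_⟩
          intro y hy hmem
          rcases (PySem.Set.mem_union _ _ _).1 hmem with h1 | h2
          · exact havoid y (by simp [hy]) h1
          · have hyr : y = r := by simpa using h2
            exact (List.nodup_cons.1 hnd).1 (hyr ▸ hy)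

theorem pv_forall2_sublist {α β : Type} {R : α → β → Prop} :
    ∀ {v c : List α} {reps : List β}, List.Forall₂ R v reps → c.Sublist v →
      ∃ r', r'.Sublist reps ∧ List.Forall₂ R c r' := by
  intro v c reps hf hs
  induction hs generalizing reps with
  | slnil => exact ⟨[], List.nil_sublist _, List.Forall₂.nil⟩
  | cons a hs ih =>
      rcases hf with _ | ⟨hr, hf'⟩
      obtain ⟨r', h1, h2⟩ := ih hf'
      exact ⟨r', h1.trans (List.sublist_cons_self _ _), h2⟩
  | cons₂ a hs ih =>
      rcases hf with _ | ⟨hr, hf'⟩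
      obtain ⟨r', h1, h2⟩ := ih hf'
      exact ⟨_ :: r', h1.cons₂ _, List.Forall₂.cons hr h2⟩

theorem pv_forall2_mem_right {α β : Type} {R : α → β → Prop} :
    ∀ {l₁ : List α} {l₂ : List β}, List.Forall₂ R l₁ l₂ → ∀ y ∈ l₂, ∃ u ∈ l₁, R u y := by
  intro l₁ l₂ h
  induction h with
  | nil => simp
  | cons hr h ih =>
      intro y hy
      rcases List.mem_cons.1 hy with rfl | hy'
      · exact ⟨_, by simp, hr⟩
      · obtain ⟨u, hu, hR⟩ := ih y hy'
        exact ⟨u, by simp [hu], hR⟩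

theorem pv_hallCheck_iff (vs : List (List Int)) (comb : List Int) :
    pvHallCheck vs vs.length comb = true ↔
      ((vs.map (fun l => PySem.Set.inter (PySem.Set.ofList l) comb)).any
          (fun s => PySem.Set.len s == 0) = false ∧
       ∀ p : Int, p ∈ PySem.List.pyRange 2 (vs.length : Int) 1 →
         ∀ c ∈ PySem.List.combinations
             (vs.map (fun l => PySem.Set.inter (PySem.Set.ofList l) comb)) p.toNat,
           ¬ (PySem.Set.len (pvUnionAll c) < p)) := by
  unfold pvHallCheck
  by_cases hany : (vs.map (fun l => PySem.Set.inter (PySem.Set.ofList l) comb)).any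
      (fun s => PySem.Set.len s == 0) = true
  · simp
  · simp only [Bool.not_eq_true] at hany
    simp [List.all_eq_true]

theorem pv_check_of_sdr (vs : List (List Int)) (comb : List Int)
    (hsdr : pvSdr vs (PySem.Set.ofList comb) PySem.Set.empty = true) :
    pvHallCheck vs vs.length comb = true := by
  obtain ⟨reps, hf, hnd, -⟩ := (pv_sdr_iff vs _ _).1 hsdr
  have hforall : List.Forall₂ (fun u r => r ∈ u)
      (vs.map (fun l => PySem.Set.inter (PySem.Set.ofList l) comb)) reps := by
    rw [List.forall₂_map_left_iff]
    refine hf.imp (fun a b hab => ?_)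
    exact (PySem.Set.mem_inter _ _ _).2
      ⟨(PySem.Set.mem_ofList _ _).2 hab.1, (PySem.Set.mem_ofList _ _).1 hab.2⟩
  apply (pv_hallCheck_iff vs comb).2
  constructor
  · rw [List.any_eq_false]
    intro u hu
    obtain ⟨i, hi⟩ := List.mem_iff_get.1 hu
    have hlen := hforall.length_eq
    have hg := (List.forall₂_iff_get.1 hforall).2 i.1 i.2 (by omega)
    have hi' : (vs.map (fun l => PySem.Set.inter (PySem.Set.ofList l) comb))[i.1] = u := by
      simpa [List.get_eq_getElem] using hi
    simp only [List.get_eq_getElem, hi'] at hg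
    have hne : u ≠ [] := List.ne_nil_of_mem hg
    simpa [PySem.Set.len] using hne
  · intro p hp c hc
    obtain ⟨hsub, hclen⟩ := (PySem.List.mem_combinations_iff _ _ _).1 hc
    obtain ⟨r', hr'sub, hr'f⟩ := pv_forall2_sublist hforall hsub
    have hr'nd : r'.Nodup := hr'sub.nodup hnd
    have hsubset : ∀ y ∈ r', y ∈ pvUnionAll c := by
      intro y hy
      obtain ⟨u, hu, hR⟩ := pv_forall2_mem_right hr'f y hy
      exact (pv_mem_unionAll c y).2 ⟨u, hu, hR⟩
    have hr'len : r'.length = p.toNat := by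
      rw [← hr'f.length_eq, hclen]
    have hcard : r'.toFinset.card ≤ (pvUnionAll c).toFinset.card :=
      Finset.card_le_card (fun y hy =>
        List.mem_toFinset.2 (hsubset y (List.mem_toFinset.1 hy)))
    rw [List.toFinset_card_of_nodup hr'nd, hr'len,
      List.toFinset_card_of_nodup (pv_nodup_unionAll c)] at hcard
    have hp2 : 2 ≤ p := (PySem.List.mem_pyRange_one.1 hp).1
    simp only [PySem.Set.len, not_lt]
    omega

theorem pv_sdr_of_check (vs : List (List Int)) (comb : List Int)
    (hnd : comb.Nodup) (hlen : comb.length = vs.length)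
    (hcov : ∀ x ∈ comb, ∃ s ∈ vs, x ∈ s)
    (hchk : pvHallCheck vs vs.length comb = true) :
    pvSdr vs (PySem.Set.ofList comb) PySem.Set.empty = true := by
  classical
  obtain ⟨hany, hpcheck⟩ := (pv_hallCheck_iff vs comb).1 hchk
  set v := vs.map (fun l => PySem.Set.inter (PySem.Set.ofList l) comb) with hvdef
  have hvlen : v.length = vs.length := by simp [hvdef]
  have hne : ∀ u ∈ v, u ≠ [] := by
    rw [List.any_eq_false] at hany
    intro u hu hunil
    exact hany u hu (by simp [hunil, PySem.Set.len])
  set t : Fin v.length → Finset Int := fun i => (v.get i).toFinset with ht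
  have hhall : ∀ s : Finset (Fin v.length), s.card ≤ (s.biUnion t).card := by
    intro s
    set L := (List.finRange v.length).filter (fun i => decide (i ∈ s)) with hL
    have hLsub : L.Sublist (List.finRange v.length) := List.filter_sublist
    have hLnd : L.Nodup := (List.nodup_finRange _).filter _
    have hLmem : ∀ i, i ∈ L ↔ i ∈ s := by
      intro i; simp [hL]
    have hLlen : L.length = s.card := by
      have hts : L.toFinset = s := Finset.ext (fun i => by
        rw [List.mem_toFinset]; exact hLmem i)
      rw [← hts, List.toFinset_card_of_nodup hLnd]
    set c := L.map v.get with hc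
    have hcsub : c.Sublist v := by
      have h := hLsub.map v.get
      rwa [List.map_get_finRange] at h
    have hclen : c.length = s.card := by simp [hc, hLlen]
    have hmemU : ∀ x, x ∈ pvUnionAll c ↔ x ∈ s.biUnion t := by
      intro x
      rw [pv_mem_unionAll]
      simp only [Finset.mem_biUnion]
      constructor
      · rintro ⟨u, hu, hx⟩
        obtain ⟨i, hiL, rfl⟩ := List.mem_map.1 (hc ▸ hu)
        exact ⟨i, (hLmem i).1 hiL, List.mem_toFinset.2 hx⟩
      · rintro ⟨i, his, hx⟩
        exact ⟨v.get i, by rw [hc]; exact List.mem_map_of_mem ((hLmem i).2 his),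
          List.mem_toFinset.1 hx⟩
    have hcardU : (s.biUnion t).card = (pvUnionAll c).length := by
      have hset : (pvUnionAll c).toFinset = s.biUnion t := Finset.ext (fun x => by
        rw [List.mem_toFinset]; exact hmemU x)
      rw [← hset, List.toFinset_card_of_nodup (pv_nodup_unionAll c)]
    rcases Nat.lt_or_ge s.card 1 with hp0 | hp1
    · omega
    rcases Nat.lt_or_ge s.card 2 with hp1' | hp2
    · -- s.card = 1
      have h1 : s.card = 1 := by omega
      obtain ⟨i, rfl⟩ := Finset.card_eq_one.1 h1
      obtain ⟨y, hy⟩ := List.exists_mem_of_ne_nil _ (hne _ (List.get_mem v i))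
      have : (t i).Nonempty := ⟨y, List.mem_toFinset.2 hy⟩
      simpa [h1, Finset.singleton_biUnion] using Finset.Nonempty.card_pos this
    rcases Nat.lt_or_ge s.card vs.length with hplt | hpge
    · -- 2 ≤ s.card < n : A's explicit check
      have hcmem : c ∈ PySem.List.combinations v (s.card : Int).toNat :=
        (PySem.List.mem_combinations_iff _ _ _).2 ⟨hcsub, by simp [hclen]⟩
      have hck := hpcheck (s.card : Int)
        (PySem.List.mem_pyRange_one.2 ⟨by exact_mod_cast hp2, by exact_mod_cast hplt⟩)
        c hcmem
      simp only [PySem.Set.len, not_lt] at hck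
      rw [hcardU]
      exact_mod_cast hck
    · -- s.card = n : every element of comb lies in some restricted set
      have hcard : s.card = vs.length := by
        have := Finset.card_le_univ s
        simp [Fintype.card_fin, hvlen] at this
        omega
      have hsuniv : s = Finset.univ :=
        Finset.eq_univ_of_card s (by simp [Fintype.card_fin, hvlen, hcard])
      have hsubset : comb.toFinset ⊆ s.biUnion t := by
        intro x hx
        have hxc : x ∈ comb := List.mem_toFinset.1 hx
        obtain ⟨u, hu, hxu⟩ := hcov x hxc
        obtain ⟨i, hi⟩ := List.mem_iff_get.1 hu
        refine Finset.mem_biUnion.2 ⟨Fin.cast hvlen.symm i, by simp [hsuniv], ?_⟩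
        apply List.mem_toFinset.2
        have hig : vs[i.1] = u := by simpa [List.get_eq_getElem] using hi
        have hv : v.get (Fin.cast hvlen.symm i) =
            PySem.Set.inter (PySem.Set.ofList u) comb := by
          simp [hvdef, List.get_eq_getElem, List.getElem_map, hig]
        rw [hv]
        exact (PySem.Set.mem_inter _ _ _).2 ⟨(PySem.Set.mem_ofList _ _).2 hxu, hxc⟩
      have hcc := Finset.card_le_card hsubset
      rw [List.toFinset_card_of_nodup hnd, hlen] at hcc
      omega
  obtain ⟨f, hfinj, hft⟩ := (Finset.all_card_le_biUnion_card_iff_exists_injective t).1 hhall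
  apply (pv_sdr_iff vs _ _).2
  refine ⟨(List.finRange v.length).map f, ?_, (List.nodup_finRange _).map hfinj, by
    simp [PySem.Set.empty]⟩
  rw [List.forall₂_iff_get]
  refine ⟨by simp [hvlen], ?_⟩
  intro i h1 h2
  have h2' : i < v.length := by simpa using h2
  have hfi : f ⟨i, h2'⟩ ∈ (v.get ⟨i, h2'⟩).toFinset := hft ⟨i, h2'⟩
  have hv : v.get ⟨i, h2'⟩ =
      PySem.Set.inter (PySem.Set.ofList (vs.get ⟨i, h1⟩)) comb := by
    simp [hvdef, List.get_eq_getElem, List.getElem_map]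
  rw [hv] at hfi
  have hmem := List.mem_toFinset.1 hfi
  have hget : (List.map f (List.finRange v.length)).get ⟨i, h2⟩ = f ⟨i, h2'⟩ := by
    simp [List.get_eq_getElem, List.getElem_map]
  rw [hget]
  obtain ⟨hin, hic⟩ := (PySem.Set.mem_inter _ _ _).1 hmem
  exact ⟨(PySem.Set.mem_ofList _ _).1 hin, (PySem.Set.mem_ofList _ _).2 hic⟩

theorem pv_check_eq_sdr (vs : List (List Int)) (comb : List Int)
    (hnd : comb.Nodup) (hlen : comb.length = vs.length)
    (hcov : ∀ x ∈ comb, ∃ s ∈ vs, x ∈ s) :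
    pvHallCheck vs vs.length comb = pvSdr vs (PySem.Set.ofList comb) PySem.Set.empty := by
  apply Bool.eq_iff_iff.2
  exact ⟨pv_sdr_of_check vs comb hnd hlen hcov, pv_check_of_sdr vs comb⟩

-- ===== VERDICT (by name: the statement is the Claim_ definition above) =====
theorem max_sum_efficient_spec : Claim_equal_max_sum_efficient := by
  intro vs _ _
  unfold Spec_max_sum_efficient max_sum_efficient max_sum_efficient_alt
  rw [pv_search_eq_findSome vs vs.length _ [] (by simp)]
  apply pv_findSome?_congr_mem
  intro comb hc
  obtain ⟨hsub, hlen⟩ := (PySem.List.mem_combinations_iff _ _ _).1 hc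
  have hUnodup : (PySem.List.sorted (pvUnionAll vs) (fun x => x) true).Nodup :=
    ((PySem.List.sorted_perm (pvUnionAll vs) (fun x => x) true).nodup_iff).2 (pv_nodup_unionAll vs)
  have hnd : comb.Nodup := hsub.nodup hUnodup
  have hcov : ∀ x ∈ comb, ∃ s ∈ vs, x ∈ s := by
    intro x hx
    exact (pv_mem_unionAll vs x).1
      ((PySem.List.mem_sorted _ _ _ _).1 (hsub.subset hx))
  rw [pv_check_eq_sdr vs comb hnd hlen hcov]
  simp [pvLeaf]
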